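-- pv_equiv track=rewrite | github.com/JohnLapis/py-studies | problems/ScaleBalancing.py | ScaleBalancing
-- ===== SOURCE A (Python) =====
-- def ScaleBalancing(strArr):
--     a = strArr[0][0]
--     b = strArr[0][1]
--     for n in strArr[1]:
--         if n + a == b or n + b == a:
--             return str(n)
--         for m in strArr[1]:
--             if m == n:
--                 continue
--             elif abs(m - n) == abs(a - b):
--                 if m + a == n + b:
--                     return f'{m},{n}'
--                 else:
--                     return f'{n},{m}'
--             elif m + n == abs(a-b):
--                 return f'{m},{n}'
-- ===== SOURCE B (Python) =====
-- def ScaleBalancing(strArr):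
--     a, b = strArr[0][0], strArr[0][1]
--     ws = strArr[1]
--     d = abs(a - b)
--     first = {}
--     for i, v in enumerate(ws):
--         if v not in first:
--             first[v] = i
--     for n in ws:
--         if n + a == b or n + b == a:
--             return str(n)
--         best = None
--         for c in (n - d, n + d, d - n):
--             if c != n:
--                 i = first.get(c)
--                 if i is not None and (best is None or i < best[0]):
--                     best = (i, c)
--         if best is not None:
--             m = best[1]
--             if abs(m - n) == d:
--                 return f'{m},{n}' if m + a == n + b else f'{n},{m}'
--             return f'{m},{n}'
-- ===== Notes on version B (the rewrite author's own statement) =====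
-- stated objective: faster
-- what changed: Replaces A's inner O(n) scan per element by a hash map value->first index built once: for each n only the three arithmetically possible partner values n-d, n+d, d-n are looked up and the one with the smallest first-occurrence index is chosen, turning the pair search from O(n^2) into O(n).
import Mathlib
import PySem

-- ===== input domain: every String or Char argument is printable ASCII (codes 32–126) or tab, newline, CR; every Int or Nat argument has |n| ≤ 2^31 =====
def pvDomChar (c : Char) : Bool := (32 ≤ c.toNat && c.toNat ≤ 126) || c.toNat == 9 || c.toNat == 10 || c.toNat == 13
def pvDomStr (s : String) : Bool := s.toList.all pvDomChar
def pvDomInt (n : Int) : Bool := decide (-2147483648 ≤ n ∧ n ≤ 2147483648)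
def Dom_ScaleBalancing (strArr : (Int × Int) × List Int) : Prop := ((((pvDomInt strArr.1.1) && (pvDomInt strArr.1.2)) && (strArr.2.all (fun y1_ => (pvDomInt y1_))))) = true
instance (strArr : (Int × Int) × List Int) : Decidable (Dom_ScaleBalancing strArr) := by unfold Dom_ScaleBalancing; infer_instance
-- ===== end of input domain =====

-- B replaces A's quadratic inner scan by a value -> first-index hash map with three
-- candidate lookups per element (O(n) vs O(n^2)); return values identical on all inputs.

-- ===== PORT A =====
-- inner 'for m in strArr[1]' loop of A
def pvInnerA (a b n : Int) : List Int → Option String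
  | [] => none
  | m :: ms =>
    if m = n then pvInnerA a b n ms
    else if ((m - n).natAbs : Int) = ((a - b).natAbs : Int) then
      some (if m + a = n + b
            then PySem.Int.toStr m ++ "," ++ PySem.Int.toStr n
            else PySem.Int.toStr n ++ "," ++ PySem.Int.toStr m)
    else if m + n = ((a - b).natAbs : Int) then
      some (PySem.Int.toStr m ++ "," ++ PySem.Int.toStr n)
    else pvInnerA a b n ms

-- outer 'for n in strArr[1]' loop of A
def pvOuterA (a b : Int) (ws : List Int) : List Int → Option String
  | [] => none
  | n :: ns =>
    if n + a = b ∨ n + b = a then some (PySem.Int.toStr n)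
    else match pvInnerA a b n ws with
      | some s => some s
      | none => pvOuterA a b ws ns

def ScaleBalancing (strArr : (Int × Int) × List Int) : Option String :=
  pvOuterA strArr.1.1 strArr.1.2 strArr.2 strArr.2

-- ===== PORT B =====
-- first = {}; for i, v in enumerate(ws): if v not in first: first[v] = i
def pvFirst (ws : List Int) : PySem.Dict Int Int :=
  (PySem.List.enumerate ws).foldl
    (fun d p => if d.contains p.2 then d else d.insert p.2 p.1) PySem.Dict.empty

-- body of B's three-candidate loop
def pvStep (first : PySem.Dict Int Int) (n : Int)
    (best : Option (Int × Int)) (c : Int) : Option (Int × Int) :=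
  if c = n then best
  else match first.get? c with
    | none => best
    | some i =>
      match best with
      | none => some (i, c)
      | some (j, _) => if i < j then some (i, c) else best

def pvBest (first : PySem.Dict Int Int) (n d0 : Int) : Option (Int × Int) :=
  [n - d0, n + d0, d0 - n].foldl (pvStep first n) none

-- outer 'for n in ws' loop of B
def pvOuterB (a b d0 : Int) (first : PySem.Dict Int Int) : List Int → Option String
  | [] => none
  | n :: ns =>
    if n + a = b ∨ n + b = a then some (PySem.Int.toStr n)
    else match pvBest first n d0 with
      | some p =>
        some (if ((p.2 - n).natAbs : Int) = d0 then
                (if p.2 + a = n + b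
                 then PySem.Int.toStr p.2 ++ "," ++ PySem.Int.toStr n
                 else PySem.Int.toStr n ++ "," ++ PySem.Int.toStr p.2)
              else PySem.Int.toStr p.2 ++ "," ++ PySem.Int.toStr n)
      | none => pvOuterB a b d0 first ns

def ScaleBalancing_alt (strArr : (Int × Int) × List Int) : Option String :=
  let a := strArr.1.1
  let b := strArr.1.2
  pvOuterB a b ((a - b).natAbs : Int) (pvFirst strArr.2) strArr.2

-- ===== PRECONDITION & SPEC =====
def Spec_ScaleBalancing (strArr : (Int × Int) × List Int) (out : Option String) : Prop := out = ScaleBalancing_alt strArr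
instance (strArr : (Int × Int) × List Int) (out : Option String) : Decidable (Spec_ScaleBalancing strArr out) := by unfold Spec_ScaleBalancing; infer_instance

-- ===== CLAIM (what is proved, stated in full; the proofs are below) =====
def Claim_equal_ScaleBalancing : Prop := ∀ (strArr : (Int × Int) × List Int), Dom_ScaleBalancing strArr → Spec_ScaleBalancing strArr (ScaleBalancing strArr)

-- ===== LEMMAS AND PROOFS =====

-- B's output format for a found partner p.2 = m (same string A's branches produce)
def pvFmt (a b n m : Int) : String :=
  if ((m - n).natAbs : Int) = ((a - b).natAbs : Int) then
    (if m + a = n + b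
     then PySem.Int.toStr m ++ "," ++ PySem.Int.toStr n
     else PySem.Int.toStr n ++ "," ++ PySem.Int.toStr m)
  else PySem.Int.toStr m ++ "," ++ PySem.Int.toStr n

-- the predicate A's inner loop searches for
def pvP (a b n m : Int) : Bool :=
  decide (m ≠ n ∧ (((m - n).natAbs : Int) = ((a - b).natAbs : Int) ∨ m + n = ((a - b).natAbs : Int)))

lemma pvInnerA_eq_find (a b n : Int) (ms : List Int) :
    pvInnerA a b n ms = (ms.find? (pvP a b n)).map (pvFmt a b n) := by
  induction ms with
  | nil => simp [pvInnerA]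
  | cons m ms ih =>
    by_cases h1 : m = n
    · simp [pvInnerA, h1, List.find?, pvP, ih]
    · by_cases h2 : ((m - n).natAbs : Int) = ((a - b).natAbs : Int)
      · have h2' : |m - n| = |a - b| := by
          rw [Int.abs_eq_natAbs, Int.abs_eq_natAbs]; exact h2
        simp [pvInnerA, h1, h2, List.find?, pvP, pvFmt]
      · have h2' : ¬ |m - n| = |a - b| := by
          rw [Int.abs_eq_natAbs, Int.abs_eq_natAbs]; exact h2
        by_cases h3 : m + n = ((a - b).natAbs : Int)
        · have h3' : m + n = |a - b| := by rw [Int.abs_eq_natAbs]; exact h3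
          simp [pvInnerA, h1, h2', h3, List.find?, pvP, pvFmt]
        · have h3' : ¬ m + n = |a - b| := by rw [Int.abs_eq_natAbs]; exact h3
          simp [pvInnerA, h1, h2', h3', List.find?, pvP, ih]

lemma pvFirst_get_gen (v : Int) :
    ∀ (ws : List Int) (s : Int) (d : PySem.Dict Int Int),
      ((PySem.List.enumerate ws s).foldl
        (fun d p => if d.contains p.2 then d else d.insert p.2 p.1) d).get? v
      = if d.contains v then d.get? v
        else (PySem.List.index? ws v).map (fun k => (k : Int) + s) := by
  intro ws
  induction ws with
  | nil =>
    intro s d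
    simp [PySem.List.enumerate_nil]
    intro h
    exact (PySem.Dict.get?_eq_none_iff_contains d v).mpr (by simp [h])
  | cons x xs ih =>
    intro s d
    rw [PySem.List.enumerate_cons]
    simp only [List.foldl_cons]
    by_cases hc : d.contains x
    · rw [if_pos hc, ih]
      by_cases hv : v = x
      · subst hv
        rw [PySem.List.index?_cons_self]
        simp [hc]
      · rw [PySem.List.index?_cons_of_ne xs (fun h => hv h.symm)]
        by_cases hdv : d.contains v
        · simp [hdv]
        · simp only [hdv]
          cases PySem.List.index? xs v with
          | none => simp
          | some k => simp; omega
    · rw [if_neg hc, ih]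
      by_cases hv : v = x
      · subst hv
        rw [PySem.List.index?_cons_self]
        have h1 : (d.insert v s).contains v = true := by
          rw [PySem.Dict.contains_insert]; simp
        have h2 : (d.insert v s).get? v = some s := by
          rw [PySem.Dict.get?_insert]; simp
        simp [h1, h2, hc]
      · have h1 : (d.insert x s).contains v = d.contains v := by
          rw [PySem.Dict.contains_insert]; simp [hv]
        have h2 : (d.insert x s).get? v = d.get? v := by
          rw [PySem.Dict.get?_insert]; simp [hv]
        rw [h1, h2, PySem.List.index?_cons_of_ne xs (fun h => hv h.symm)]
        by_cases hdv : d.contains v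
        · simp [hdv]
        · simp only [hdv]
          cases PySem.List.index? xs v with
          | none => simp
          | some k => simp; omega

lemma pvFirst_get (ws : List Int) (v : Int) :
    (pvFirst ws).get? v = (PySem.List.index? ws v).map (fun k => (k : Int)) := by
  unfold pvFirst
  rw [pvFirst_get_gen]
  simp [PySem.Dict.contains_empty]

-- invariant of B's three-candidate minimum-index fold
def pvGood (first : PySem.Dict Int Int) (n : Int)
    (r : Option (Int × Int)) (T : List Int) : Prop :=
  (r = none → ∀ c ∈ T, c ≠ n → first.get? c = none) ∧
  (∀ i m, r = some (i, m) →
    m ∈ T ∧ m ≠ n ∧ first.get? m = some i ∧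
    ∀ c ∈ T, c ≠ n → ∀ j, first.get? c = some j → i ≤ j)

lemma pvStep_good (first : PySem.Dict Int Int) (n : Int)
    (acc : Option (Int × Int)) (T : List Int) (c : Int)
    (h : pvGood first n acc T) : pvGood first n (pvStep first n acc c) (T ++ [c]) := by
  obtain ⟨hnone, hsome⟩ := h
  unfold pvStep
  by_cases hc : c = n
  · subst hc
    simp only [if_true]
    refine ⟨fun hr d hd hdn => ?_, fun i m hr => ?_⟩
    · rcases List.mem_append.mp hd with h | h
      · exact hnone hr d h hdn
      · simp at h; exact absurd h hdn
    · obtain ⟨hm, hmn, hgm, hmin⟩ := hsome i m hr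
      refine ⟨List.mem_append.mpr (Or.inl hm), hmn, hgm, fun d hd hdn j hj => ?_⟩
      rcases List.mem_append.mp hd with h | h
      · exact hmin d h hdn j hj
      · simp at h; exact absurd h hdn
  · simp only [hc, if_false]
    cases hg : first.get? c with
    | none =>
      refine ⟨fun hr d hd hdn => ?_, fun i m hr => ?_⟩
      · rcases List.mem_append.mp hd with h | h
        · exact hnone hr d h hdn
        · simp at h; subst h; exact hg
      · obtain ⟨hm, hmn, hgm, hmin⟩ := hsome i m hr
        refine ⟨List.mem_append.mpr (Or.inl hm), hmn, hgm, fun d hd hdn j hj => ?_⟩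
        rcases List.mem_append.mp hd with h | h
        · exact hmin d h hdn j hj
        · simp at h; subst h; rw [hg] at hj; cases hj
    | some i =>
      cases acc with
      | none =>
        refine ⟨fun hr => (nomatch hr), fun i' m hr => ?_⟩
        simp only [Option.some.injEq, Prod.mk.injEq] at hr
        obtain ⟨hi, hm⟩ := hr; subst hi; subst hm
        refine ⟨List.mem_append.mpr (Or.inr (by simp)), hc, hg, fun d hd hdn j hj => ?_⟩
        rcases List.mem_append.mp hd with h | h
        · rw [hnone rfl d h hdn] at hj; cases hj
        · simp at h; subst h; rw [hg] at hj
          simp only [Option.some.injEq] at hj; omega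
      | some p =>
        obtain ⟨j0, w⟩ := p
        obtain ⟨hw, hwn, hgw, hmin⟩ := hsome j0 w rfl
        by_cases hlt : i < j0
        · simp only [hlt, if_true]
          refine ⟨fun hr => (nomatch hr), fun i' m hr => ?_⟩
          simp only [Option.some.injEq, Prod.mk.injEq] at hr
          obtain ⟨hi, hm⟩ := hr; subst hi; subst hm
          refine ⟨List.mem_append.mpr (Or.inr (by simp)), hc, hg, fun d hd hdn j hj => ?_⟩
          rcases List.mem_append.mp hd with h | h
          · have := hmin d h hdn j hj; omega
          · simp at h; subst h; rw [hg] at hj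
            simp only [Option.some.injEq] at hj; omega
        · simp only [hlt, if_false]
          refine ⟨fun hr => (nomatch hr), fun i' m hr => ?_⟩
          simp only [Option.some.injEq, Prod.mk.injEq] at hr
          obtain ⟨hi, hm⟩ := hr; subst hi; subst hm
          refine ⟨List.mem_append.mpr (Or.inl hw), hwn, hgw, fun d hd hdn j hj => ?_⟩
          rcases List.mem_append.mp hd with h | h
          · exact hmin d h hdn j hj
          · simp at h; subst h; rw [hg] at hj
            simp only [Option.some.injEq] at hj; omega

lemma pvFold_good (first : PySem.Dict Int Int) (n : Int) :
    ∀ (cs : List Int) (acc : Option (Int × Int)) (T : List Int),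
      pvGood first n acc T → pvGood first n (cs.foldl (pvStep first n) acc) (T ++ cs) := by
  intro cs
  induction cs with
  | nil => intro acc T h; simpa using h
  | cons c cs ih =>
    intro acc T h
    have := ih (pvStep first n acc c) (T ++ [c]) (pvStep_good first n acc T c h)
    simpa using this

lemma pvBest_good (first : PySem.Dict Int Int) (n d0 : Int) :
    pvGood first n (pvBest first n d0) [n - d0, n + d0, d0 - n] := by
  have h0 : pvGood first n none [] := by
    constructor
    · intro _ c hc; cases hc
    · intro i m h; cases h
  have := pvFold_good first n [n - d0, n + d0, d0 - n] none [] h0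
  simpa [pvBest] using this

lemma pvP_iff_mem (a b n m : Int) :
    pvP a b n m = true ↔
      (m ≠ n ∧ m ∈ [n - ((a - b).natAbs : Int), n + ((a - b).natAbs : Int), ((a - b).natAbs : Int) - n]) := by
  simp only [pvP, decide_eq_true_eq, List.mem_cons, List.not_mem_nil, or_false]
  constructor
  · rintro ⟨h1, h2⟩; exact ⟨h1, by omega⟩
  · rintro ⟨h1, h2⟩; exact ⟨h1, by omega⟩

lemma pvFind_eq_best (a b n : Int) (ws : List Int) :
    ws.find? (pvP a b n)
      = (pvBest (pvFirst ws) n ((a - b).natAbs : Int)).map (fun p => p.2) := by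
  have hgood := pvBest_good (pvFirst ws) n ((a - b).natAbs : Int)
  obtain ⟨hnone, hsome⟩ := hgood
  cases hb : pvBest (pvFirst ws) n ((a - b).natAbs : Int) with
  | none =>
    simp only [Option.map_none]
    rw [List.find?_eq_none]
    intro x hx hpx
    obtain ⟨hxn, hxc⟩ := (pvP_iff_mem a b n x).mp hpx
    have := hnone hb x hxc hxn
    rw [pvFirst_get] at this
    have : PySem.List.index? ws x = none := by
      cases h : PySem.List.index? ws x with
      | none => rfl
      | some k => rw [h] at this; cases this
    exact absurd hx ((PySem.List.index?_eq_none_iff ws x).mp this)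
  | some p =>
    obtain ⟨i, m⟩ := p
    obtain ⟨hm, hmn, hgm, hmin⟩ := hsome i m hb
    rw [pvFirst_get] at hgm
    obtain ⟨k, hk, hik⟩ : ∃ k, PySem.List.index? ws m = some k ∧ (k : Int) = i := by
      cases h : PySem.List.index? ws m with
      | none => rw [h] at hgm; cases hgm
      | some k => rw [h] at hgm; simp at hgm; exact ⟨k, rfl, hgm⟩
    obtain ⟨pre, suf, hws, hlen, hmpre⟩ := (PySem.List.index?_eq_some_iff ws m k).mp hk
    rw [hws, List.find?_append]
    have hpre : pre.find? (pvP a b n) = none := by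
      rw [List.find?_eq_none]
      intro x hx hpx
      obtain ⟨hxn, hxc⟩ := (pvP_iff_mem a b n x).mp hpx
      have hxws : x ∈ ws := by rw [hws]; exact List.mem_append.mpr (Or.inl hx)
      obtain ⟨j, hj⟩ := Option.isSome_iff_exists.mp
        ((PySem.List.index?_isSome_iff ws x).mpr hxws)
      have hij : i ≤ (j : Int) := by
        have := hmin x hxc hxn (j : Int) (by rw [pvFirst_get, hj]; rfl)
        exact this
      obtain ⟨hjlt, hgj, hfirst⟩ := PySem.List.getElem_of_index?_eq_some hj
      obtain ⟨q, hq, hqx⟩ := List.getElem_of_mem hx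
      have hq? : ws[q]? = some x := by
        rw [hws, List.getElem?_append_left hq, List.getElem?_eq_getElem hq, hqx]
      obtain ⟨hqlt, hqws⟩ := List.getElem?_eq_some_iff.mp hq?
      have hjq : j ≤ q := by
        by_contra hgt
        push Not at hgt
        exact hfirst q hgt hqws
      omega
    rw [hpre]
    have hpm : pvP a b n m = true := by
      rw [pvP_iff_mem]
      exact ⟨hmn, hm⟩
    simp [List.find?_cons_of_pos hpm]

lemma pvOuter_eq (a b : Int) (ws : List Int) :
    ∀ ns, pvOuterA a b ws ns = pvOuterB a b ((a - b).natAbs : Int) (pvFirst ws) ns := by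
  intro ns
  induction ns with
  | nil => simp [pvOuterA, pvOuterB]
  | cons n ns ih =>
    unfold pvOuterA pvOuterB
    by_cases h : n + a = b ∨ n + b = a
    · simp [h]
    · simp only [h, if_false]
      rw [pvInnerA_eq_find, pvFind_eq_best]
      cases pvBest (pvFirst ws) n ((a - b).natAbs : Int) with
      | none => simpa using ih
      | some p => simp [pvFmt]


-- ===== VERDICT (by name: the statement is the Claim_ definition above) =====
theorem ScaleBalancing_spec : Claim_equal_ScaleBalancing := by
  intro strArr _
  unfold Spec_ScaleBalancing ScaleBalancing ScaleBalancing_alt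
  exact pvOuter_eq strArr.1.1 strArr.1.2 strArr.2 strArr.2
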